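-- pv_equiv track=rewrite | github.com/lcheeyon/deepcode | scripts/generate_ac_details_and_squad_docs.py | parse_given
-- ===== SOURCE A (Python) =====
-- def parse_given(ac_text: str) -> str | None:
--     lowered = ac_text.lower()
--     if lowered.startswith("given "):
--         rest = ac_text[6:].strip()
--         for sep in (" When ", " when ", " Then ", " then ", "\n"):
--             if sep in rest:
--                 rest = rest.split(sep)[0]
--         return rest.strip().rstrip(".")
--     return None
-- ===== SOURCE B (Python) =====
-- def parse_given(ac_text: str):
--     if ac_text[:6].lower() != "given ":
--         return None
--     rest = ac_text[6:].strip()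
--
--     def cut(end, seps):
--         if not seps:
--             return end
--         i = rest[:end].find(seps[0])
--         return cut(end if i < 0 else i, seps[1:])
--
--     end = cut(len(rest), (" When ", " when ", " Then ", " then ", "\n"))
--     return rest[:end].strip().rstrip(".")
-- ===== Notes on version B (the rewrite author's own statement) =====
-- stated objective: alternative
-- what changed: A repeatedly tests membership and rebuilds the string with split(sep)[0] for each separator; B computes a single cut index by a recursion over the separators (find on the current prefix), slicing the string only once at the end; the guard compares the lowered 6-char prefix instead of lowering the whole string.
import Mathlib
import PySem

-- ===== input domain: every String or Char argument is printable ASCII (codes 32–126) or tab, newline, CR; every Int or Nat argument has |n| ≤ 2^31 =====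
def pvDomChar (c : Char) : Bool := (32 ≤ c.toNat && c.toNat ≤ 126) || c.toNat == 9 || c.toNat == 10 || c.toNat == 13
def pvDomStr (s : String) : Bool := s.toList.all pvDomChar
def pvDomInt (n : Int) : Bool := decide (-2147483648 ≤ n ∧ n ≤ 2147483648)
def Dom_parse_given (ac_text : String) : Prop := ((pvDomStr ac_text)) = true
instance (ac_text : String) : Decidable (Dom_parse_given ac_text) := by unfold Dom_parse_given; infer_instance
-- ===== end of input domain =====

-- B replaces A's repeated membership-test + split string rebuilding by a recursive cut-index
-- computation (find on a shrinking prefix, one final slice); objective: alternative.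

-- exact port of str.rstrip("."): drop trailing '.' characters (used by both Pythons' return line)
def pvRstripDot (s : List Char) : List Char :=
  (s.reverse.dropWhile (fun c => c == '.')).reverse

-- ===== PORT A =====
def parse_given (ac_text : String) : Option String :=
  let lowered := PySem.Chars.lower ac_text.toList
  if PySem.Chars.startswith lowered "given ".toList then
    let rest0 := PySem.Chars.strip (PySem.List.slice ac_text.toList (some 6) none)
    -- for sep in (...): if sep in rest: rest = rest.split(sep)[0]
    -- (split with a nonempty sep is never empty, so headD [] is rest.split(sep)[0] exactly)
    let rest := [" When ".toList, " when ".toList, " Then ".toList, " then ".toList, "\n".toList].foldl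
      (fun r sep => if PySem.Chars.isIn sep r then (PySem.Chars.splitOn r sep).headD [] else r) rest0
    some (String.ofList (pvRstripDot (PySem.Chars.strip rest)))
  else none

-- ===== PORT B =====
-- def cut(end, seps): recursion over the separator tuple, end is the current cut index into rest
def pvCut (rest : List Char) (e : Int) : List (List Char) → Int
  | [] => e
  | sep :: seps =>
      let i := PySem.Chars.find (PySem.List.slice rest none (some e)) sep
      pvCut rest (if i < 0 then e else i) seps

def parse_given_alt (ac_text : String) : Option String :=
  if PySem.Chars.lower (PySem.List.slice ac_text.toList none (some 6)) ≠ "given ".toList then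
    none
  else
    let rest := PySem.Chars.strip (PySem.List.slice ac_text.toList (some 6) none)
    let e := pvCut rest (rest.length : Int)
      [" When ".toList, " when ".toList, " Then ".toList, " then ".toList, "\n".toList]
    some (String.ofList (pvRstripDot (PySem.Chars.strip (PySem.List.slice rest none (some e)))))

-- ===== PRECONDITION & SPEC =====
def Spec_parse_given (ac_text : String) (out : Option String) : Prop := out = parse_given_alt ac_text
instance (ac_text : String) (out : Option String) : Decidable (Spec_parse_given ac_text out) := by unfold Spec_parse_given; infer_instance

-- ===== CLAIM (what is proved, stated in full; the proofs are below) =====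
def Claim_equal_parse_given : Prop := ∀ (ac_text : String), Dom_parse_given ac_text → Spec_parse_given ac_text (parse_given ac_text)

-- ===== LEMMAS AND PROOFS =====

-- find.go at offset k is the offset-0 result shifted by k (or -1)
lemma pv_find_go_shift (sub l : List Char) (k : Nat) :
    PySem.Chars.find.go sub l k =
      if PySem.Chars.find.go sub l 0 = -1 then -1 else k + PySem.Chars.find.go sub l 0 := by
  induction l generalizing k with
  | nil =>
      rw [PySem.Chars.find.go.eq_1, PySem.Chars.find.go.eq_1]
      split_ifs <;> simp_all
  | cons c t ih =>
      rw [PySem.Chars.find.go.eq_2, PySem.Chars.find.go.eq_2]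
      by_cases hp : sub.isPrefixOf (c :: t) = true
      · simp [hp]
      · simp only [hp]
        rw [ih (k + 1), ih 1]
        have hb : -1 ≤ PySem.Chars.find.go sub t 0 := PySem.Chars.neg_one_le_find t sub
        set g := PySem.Chars.find.go sub t 0 with hg
        split_ifs <;> push_cast <;> omega

-- cons rule for Chars.find
lemma pv_find_cons (sub : List Char) (c : Char) (t : List Char) :
    PySem.Chars.find (c :: t) sub =
      if sub.isPrefixOf (c :: t) then 0
      else if PySem.Chars.find t sub = -1 then -1 else 1 + PySem.Chars.find t sub := by
  show PySem.Chars.find.go sub (c :: t) 0 = _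
  rw [PySem.Chars.find.go.eq_2, pv_find_go_shift]
  rfl

lemma pv_find_nil (sub : List Char) (h : sub ≠ []) : PySem.Chars.find [] sub = -1 := by
  show PySem.Chars.find.go sub [] 0 = -1
  rw [PySem.Chars.find.go.eq_1]
  simp [h]

-- once a piece is on the accumulator, the head of the final split is that first piece
lemma pv_go_stable (sep : List Char) (fuel : Nat) :
    ∀ (l cur : List Char) (as : List (List Char)) (a : List Char),
      (PySem.Chars.splitOn.go sep fuel l cur (as ++ [a])).headD [] = a := by
  induction fuel with
  | zero =>
      intro l cur as a
      rw [PySem.Chars.splitOn.go.eq_def]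
      simp
  | succ f ih =>
      intro l cur as a
      cases l with
      | nil => rw [PySem.Chars.splitOn.go.eq_def]; simp
      | cons c rest =>
          rw [PySem.Chars.splitOn.go.eq_def]
          by_cases hp : sep.isPrefixOf (c :: rest) = true
          · simp only [hp, if_true]
            have := ih (List.drop sep.length (c :: rest)) [] (cur.reverse :: as) a
            simpa using this
          · simp only [hp, Bool.false_eq_true, if_false]
            exact ih rest (c :: cur) as a

-- head of splitOn with empty accumulator: the prefix before the first occurrence
lemma pv_go_head (sep : List Char) (hsep : sep ≠ []) :
    ∀ (fuel : Nat) (l cur : List Char), l.length < fuel →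
      (PySem.Chars.splitOn.go sep fuel l cur []).headD [] =
        if PySem.Chars.find l sep = -1 then cur.reverse ++ l
        else cur.reverse ++ l.take (PySem.Chars.find l sep).toNat := by
  intro fuel
  induction fuel with
  | zero => intro l cur h; omega
  | succ f ih =>
      intro l cur h
      cases l with
      | nil =>
          rw [PySem.Chars.splitOn.go.eq_def]
          simp [pv_find_nil sep hsep]
      | cons c rest =>
          rw [PySem.Chars.splitOn.go.eq_def]
          by_cases hp : sep.isPrefixOf (c :: rest) = true
          · simp only [hp, if_true]
            have hs := pv_go_stable sep f (List.drop sep.length (c :: rest)) [] [] cur.reverse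
            simp only [List.nil_append] at hs
            rw [hs, pv_find_cons, if_pos hp]
            norm_num
          · simp only [hp, Bool.false_eq_true, if_false]
            rw [ih rest (c :: cur) (by simpa using Nat.lt_of_succ_lt_succ h)]
            rw [pv_find_cons, if_neg hp]
            have hb : -1 ≤ PySem.Chars.find rest sep := PySem.Chars.neg_one_le_find rest sep
            by_cases hm : PySem.Chars.find rest sep = -1
            · simp [hm]
            · have h0 : 0 ≤ PySem.Chars.find rest sep := by omega
              rw [if_neg hm, if_neg hm, if_neg (by omega : ¬ (1 + PySem.Chars.find rest sep = -1))]
              have : (1 + PySem.Chars.find rest sep).toNat = (PySem.Chars.find rest sep).toNat + 1 := by omega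
              rw [this]
              simp [List.take_succ_cons]

-- A's loop body, rephrased through find
lemma pv_stepA (t sep : List Char) (hsep : sep ≠ []) :
    (if PySem.Chars.isIn sep t then (PySem.Chars.splitOn t sep).headD [] else t)
      = if PySem.Chars.find t sep = -1 then t else t.take (PySem.Chars.find t sep).toNat := by
  have hh := pv_go_head sep hsep (t.length + 1) t [] (Nat.lt_succ_self _)
  by_cases hm : PySem.Chars.find t sep = -1
  · have : PySem.Chars.isIn sep t = false := by
      simp [PySem.Chars.isIn, hm]
    simp [this, hm]
  · have : PySem.Chars.isIn sep t = true := by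
      simp [PySem.Chars.isIn, hm]
    simp only [this, if_true, hm, if_false]
    show (PySem.Chars.splitOn.go sep (t.length + 1) t [] []).headD [] = _
    rw [hh, if_neg hm]
    simp

-- the loop invariant: A's current string is rest.take of B's current cut index
lemma pv_fold (seps : List (List Char)) (hne : ∀ s ∈ seps, s ≠ []) (rest : List Char) :
    ∀ e : Int, 0 ≤ e → e ≤ rest.length →
      seps.foldl (fun r sep => if PySem.Chars.isIn sep r then (PySem.Chars.splitOn r sep).headD [] else r)
          (rest.take e.toNat)
        = rest.take (pvCut rest e seps).toNat
      ∧ 0 ≤ pvCut rest e seps ∧ pvCut rest e seps ≤ e := by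
  induction seps with
  | nil => intro e h0 hl; exact ⟨rfl, h0, le_refl e⟩
  | cons sep seps ih =>
      intro e h0 hl
      have hsep : sep ≠ [] := hne sep (by simp)
      have hne' : ∀ s ∈ seps, s ≠ [] := fun s hs => hne s (by simp [hs])
      set t := rest.take e.toNat with ht
      have htlen : t.length = e.toNat := by
        rw [ht, List.length_take]
        omega
      have hslice : PySem.List.slice rest none (some e) = t := PySem.List.slice_to rest h0
      simp only [List.foldl_cons, pvCut, hslice]
      rw [pv_stepA t sep hsep]
      have hb : -1 ≤ PySem.Chars.find t sep := PySem.Chars.neg_one_le_find t sep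
      by_cases hm : PySem.Chars.find t sep = -1
      · rw [if_pos hm, if_pos (by omega)]
        exact ih hne' e h0 hl
      · have h0' : 0 ≤ PySem.Chars.find t sep := by omega
        have hle' : PySem.Chars.find t sep ≤ rest.length := by
          have := PySem.Chars.find_le_length t sep
          omega
        rw [if_neg hm, if_neg (by omega)]
        have hfle : (PySem.Chars.find t sep).toNat ≤ e.toNat := by
          have h1 := PySem.Chars.find_le_length t sep
          omega
        have htake : t.take (PySem.Chars.find t sep).toNat = rest.take (PySem.Chars.find t sep).toNat := by
          conv_lhs => rw [ht]
          rw [List.take_take, Nat.min_eq_left hfle]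
        rw [htake]
        have hres := ih hne' (PySem.Chars.find t sep) h0' hle'
        refine ⟨hres.1, hres.2.1, ?_⟩
        have := PySem.Chars.find_le_length t sep
        omega

-- both guards test the same thing
lemma pv_guard (L : List Char) :
    PySem.Chars.startswith (PySem.Chars.lower L) "given ".toList = true ↔
      PySem.Chars.lower (PySem.List.slice L none (some 6)) = "given ".toList := by
  rw [PySem.Chars.startswith, List.isPrefixOf_iff_prefix, List.prefix_iff_eq_take]
  rw [PySem.List.slice_to L (by norm_num : (0:Int) ≤ 6)]
  show _ = (PySem.Chars.lower L).take ("given ".toList).length ↔ PySem.Chars.lower (L.take (6:Int).toNat) = _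
  rw [PySem.Chars.lower, PySem.Chars.lower, ← List.map_take]
  constructor
  · intro h; exact h.symm
  · intro h; exact h.symm

-- ===== VERDICT (by name: the statement is the Claim_ definition above) =====
theorem parse_given_spec : Claim_equal_parse_given := by
  intro s _
  unfold Spec_parse_given parse_given parse_given_alt
  by_cases hg : PySem.Chars.lower (PySem.List.slice s.toList none (some 6)) = "given ".toList
  · have hA : PySem.Chars.startswith (PySem.Chars.lower s.toList) "given ".toList = true :=
      (pv_guard s.toList).mpr hg
    rw [if_pos hA, if_neg (not_not_intro hg)]
    set rest := PySem.Chars.strip (PySem.List.slice s.toList (some 6) none) with hrest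
    have hne : ∀ t ∈ [" When ".toList, " when ".toList, " Then ".toList, " then ".toList, "\n".toList], t ≠ [] := by
      decide
    have hfold := pv_fold _ hne rest (rest.length : Int) (by positivity) (le_refl _)
    have hinit : rest.take ((rest.length : Int)).toNat = rest := by simp
    rw [hinit] at hfold
    simp only [hfold.1, PySem.List.slice_to rest hfold.2.1]
  · have hA : ¬ PySem.Chars.startswith (PySem.Chars.lower s.toList) "given ".toList = true := by
      rw [pv_guard]; exact hg
    rw [if_neg hA, if_pos hg]
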